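-- pv_equiv track=rewrite | github.com/vagarwala/CodeWars-Solutions | whitespace_number.py | whitespace_number
-- ===== SOURCE A (Python) =====
-- def whitespace_number(n):
--     def binary(n):
--         s = ''
--         for char in bin(n)[2:]:
--             if char == '1':
--                 s += '\t'
--             else:
--                 s += ' '
--         return s
--     if n > 0:
--         return ' ' + binary(n) + '\n'
--     elif n == 0:
--         return " \n"
--     else:
--         return '\t' + binary((-1)*n) + '\n'
-- ===== SOURCE B (Python) =====
-- def whitespace_number(n):
--     if n == 0:
--         return " \n"
--     m = -n if n < 0 else n
--     bits = []
--     while m > 0: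
--         bits.append(m % 2)
--         m //= 2
--     return ('\t' if n < 0 else ' ') + ''.join('\t' if b else ' ' for b in reversed(bits)) + '\n'
-- ===== Notes on version B (the rewrite author's own statement) =====
-- stated objective: alternative
-- what changed: Replaces bin()-string slicing plus a per-character append loop with direct arithmetic bit extraction (repeated %2 and //2 into a list, reversed and joined), never forming a decimal/binary string via the library.
import Mathlib
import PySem

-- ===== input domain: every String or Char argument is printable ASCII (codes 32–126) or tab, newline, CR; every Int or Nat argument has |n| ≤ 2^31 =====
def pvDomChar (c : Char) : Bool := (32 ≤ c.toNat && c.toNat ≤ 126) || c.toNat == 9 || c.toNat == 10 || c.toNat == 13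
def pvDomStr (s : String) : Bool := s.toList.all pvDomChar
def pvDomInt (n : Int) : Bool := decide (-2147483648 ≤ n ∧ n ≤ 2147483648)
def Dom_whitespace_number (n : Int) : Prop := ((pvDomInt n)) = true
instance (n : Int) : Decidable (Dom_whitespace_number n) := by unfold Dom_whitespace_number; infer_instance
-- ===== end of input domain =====

-- B replaces bin()-slicing + char loop by arithmetic bit extraction (%2, //2) with a reversed bit list; alternative decomposition, same cost.


-- ===== PORT A =====
-- A's inner helper binary(n): loop over bin(n)[2:] appending '\t' for '1', ' ' otherwise
def pvBinaryA (n : Int) : String :=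
  ((PySem.Str.slice (PySem.Int.pyBin n) (some 2) none).toList).foldl
    (fun s c => if c = '1' then s.push '\t' else s.push ' ') ""

def whitespace_number (n : Int) : String :=
  if n > 0 then " " ++ pvBinaryA n ++ "\n"
  else if n = 0 then " \n"
  else "\t" ++ pvBinaryA ((-1) * n) ++ "\n"

-- ===== PORT B =====
-- B's while loop: collect m % 2 and halve, LSB first
def pvBitsBGo : Nat → Int → List Int
  | 0, _ => []
  | fuel + 1, m =>
    if m ≤ 0 then []
    else PySem.Int.mod m 2 :: pvBitsBGo fuel (PySem.Int.floordiv m 2)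

def pvBitsB (m : Int) : List Int := pvBitsBGo m.toNat m

def whitespace_number_alt (n : Int) : String :=
  if n = 0 then " \n"
  else
    (if n < 0 then "\t" else " ")
      ++ String.ofList (((pvBitsB (if n < 0 then -n else n)).reverse).map (fun b => if b ≠ 0 then '\t' else ' '))
      ++ "\n"

-- ===== PRECONDITION & SPEC =====
def Spec_whitespace_number (n : Int) (out : String) : Prop := out = whitespace_number_alt n
instance (n : Int) (out : String) : Decidable (Spec_whitespace_number n out) := by unfold Spec_whitespace_number; infer_instance

-- ===== CLAIM (what is proved, stated in full; the proofs are below) =====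
def Claim_equal_whitespace_number : Prop := ∀ (n : Int), Dom_whitespace_number n → Spec_whitespace_number n (whitespace_number n)

-- ===== LEMMAS AND PROOFS =====

theorem pvBitsBGo_eq : ∀ (f1 : Nat), ∀ (f2 : Nat) (m : Int), m.toNat ≤ f1 → m.toNat ≤ f2 →
    pvBitsBGo f1 m = pvBitsBGo f2 m := by
  intro f1
  induction f1 with
  | zero =>
    intro f2 m h1 h2
    cases f2 with
    | zero => rfl
    | succ f2 => rw [pvBitsBGo, pvBitsBGo, if_pos (by omega : m ≤ 0)]
  | succ f1 ih =>
    intro f2 m h1 h2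
    cases f2 with
    | zero => rw [pvBitsBGo, pvBitsBGo, if_pos (by omega : m ≤ 0)]
    | succ f2 =>
      rw [pvBitsBGo, pvBitsBGo]
      by_cases hm : m ≤ 0
      · rw [if_pos hm, if_pos hm]
      · rw [if_neg hm, if_neg hm,
            PySem.Int.floordiv_eq_ediv_of_pos (by norm_num : (0:Int) < 2),
            ih f2 (m / 2) (by omega) (by omega)]

theorem pvBitsB_unfold (m : Int) :
    pvBitsB m = if m ≤ 0 then [] else PySem.Int.mod m 2 :: pvBitsB (PySem.Int.floordiv m 2) := by
  by_cases hm : m ≤ 0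
  · rw [if_pos hm]
    rw [pvBitsB, show m.toNat = 0 from by omega, pvBitsBGo]
  · rw [if_neg hm, pvBitsB, pvBitsB]
    obtain ⟨k, hk⟩ : ∃ k, m.toNat = k + 1 := ⟨m.toNat - 1, by omega⟩
    rw [hk, pvBitsBGo, if_neg hm]
    rw [show PySem.Int.floordiv m 2 = m / 2 from
          PySem.Int.floordiv_eq_ediv_of_pos (by norm_num : (0:Int) < 2)]
    rw [pvBitsBGo_eq k ((m / 2).toNat) (m / 2) (by omega) (le_refl _)]

-- MSB-first binary digit characters of a Nat, the value bin(m)[2:] spells for m ≥ 0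
def pvBinCh (n : Nat) : List Char :=
  if _h : n < 2 then [Nat.digitChar n]
  else pvBinCh (n / 2) ++ [Nat.digitChar (n % 2)]
decreasing_by omega

theorem pvToDigitsCore_eq (fuel : Nat) : ∀ (n : Nat) (ds : List Char), n ≤ fuel →
    Nat.toDigitsCore 2 (fuel + 1) n ds = pvBinCh n ++ ds := by
  induction fuel with
  | zero =>
    intro n ds h
    have hn : n = 0 := by omega
    subst hn
    simp [Nat.toDigitsCore, pvBinCh]
  | succ f ih =>
    intro n ds h
    rw [Nat.toDigitsCore]
    by_cases h2 : n / 2 = 0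
    · rw [if_pos h2, pvBinCh, dif_pos (by omega : n < 2), Nat.mod_eq_of_lt (by omega)]
      rfl
    · rw [if_neg h2, ih (n / 2) _ (by omega)]
      conv_rhs => rw [pvBinCh]
      rw [dif_neg (by omega : ¬ n < 2)]
      simp

theorem pvToDigits_eq (n : Nat) : Nat.toDigits 2 n = pvBinCh n := by
  have := pvToDigitsCore_eq n n [] (le_refl n)
  simpa [Nat.toDigits] using this

theorem pvFoldlA (cs : List Char) : ∀ (s : String),
    cs.foldl (fun s c => if c = '1' then s.push '\t' else s.push ' ') s
      = s ++ String.ofList (cs.map (fun c => if c = '1' then '\t' else ' ')) := by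
  induction cs with
  | nil => intro s; apply String.toList_injective; simp
  | cons c cs ih =>
    intro s
    simp only [List.foldl_cons, ih]
    apply String.toList_injective
    by_cases hc : c = '1' <;> simp [hc]

theorem pvBitsB_rev (m : Nat) (hm : 0 < m) :
    ((pvBitsB (m : Int)).reverse).map (fun b : Int => if b ≠ 0 then '\t' else ' ')
      = (pvBinCh m).map (fun c => if c = '1' then '\t' else ' ') := by
  induction m using Nat.strong_induction_on with
  | _ m ih =>
    rw [pvBitsB_unfold, if_neg (by exact_mod_cast (by omega : ¬ (m : Int) ≤ 0))]
    rw [show PySem.Int.mod (m : Int) 2 = ((m % 2 : Nat) : Int) from PySem.Int.mod_natCast m 2,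
        show PySem.Int.floordiv (m : Int) 2 = ((m / 2 : Nat) : Int) from PySem.Int.floordiv_natCast m 2]
    by_cases h2 : m < 2
    · have hm1 : m = 1 := by omega
      subst hm1
      rw [show ((1 / 2 : Nat) : Int) = 0 from by norm_num, pvBitsB_unfold,
          if_pos (by norm_num : (0:Int) ≤ 0), pvBinCh, dif_pos (by norm_num : (1:Nat) < 2)]
      rfl
    · rw [List.reverse_cons, List.map_append, ih (m / 2) (by omega) (by omega)]
      conv_rhs => rw [pvBinCh]
      rw [dif_neg h2, List.map_append]
      rcases Nat.mod_two_eq_zero_or_one m with h | h <;> rw [h] <;> rfl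

theorem pvMiddle (m : Nat) (hm : 0 < m) :
    pvBinaryA (m : Int) = String.ofList (((pvBitsB (m : Int)).reverse).map (fun b => if b ≠ 0 then '\t' else ' ')) := by
  have hs : (PySem.Str.slice (PySem.Int.pyBin (m : Int)) (some 2) none).toList
      = Nat.toDigits 2 m := by
    rw [PySem.Str.toList_slice, PySem.Chars.slice_eq_listSlice,
        PySem.List.slice_from _ (by norm_num : (0:Int) ≤ 2),
        PySem.Int.toList_pyBin]
    unfold PySem.Int.toBinChars0b
    rw [if_neg (by omega : ¬ (m : Int) < 0)]
    simp
  rw [pvBinaryA, hs, pvFoldlA, pvToDigits_eq, pvBitsB_rev m hm]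
  apply String.toList_injective
  simp

theorem whitespace_number_spec : Claim_equal_whitespace_number := by
  intro n _
  unfold Spec_whitespace_number whitespace_number whitespace_number_alt
  rcases lt_trichotomy n 0 with h | h | h
  · rw [if_neg (by omega : ¬ n > 0), if_neg (by omega : ¬ n = 0), if_neg (by omega : ¬ n = 0),
        if_pos h, if_pos h]
    have hk : ((-n).toNat : Int) = -n := by omega
    have h1 : (-1 : Int) * n = ((-n).toNat : Int) := by omega
    rw [h1, pvMiddle (-n).toNat (by omega), hk]
  · subst h; rfl
  · rw [if_pos h, if_neg (by omega : ¬ n = 0), if_neg (by omega : ¬ n < 0), if_neg (by omega : ¬ n < 0)]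
    have hk : (n.toNat : Int) = n := by omega
    rw [show n = (n.toNat : Int) from hk.symm, pvMiddle n.toNat (by omega)]
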